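-- pv_equiv track=rewrite | github.com/C2DH/journal-of-digital-history-backend | jdhapi/utils/facebook.py | parse_tweets_md
-- ===== SOURCE A (Python) =====
-- def parse_tweets_md(md: str):
--     thread, independent = [], []
--     mode = None
--     for line in md.splitlines():
--         if line.startswith("Post thread:"):
--             mode = "thread"
--             continue
--         if line.startswith("As independent posts:"):
--             mode = "independent"
--             continue
--         if not line.strip() or mode is None:
--             continue
--         if mode == "thread" and line.lstrip()[0].isdigit() and "." in line:
--             thread.append(line.split(".", 1)[1].strip())
--         elif mode == "independent" and line.lstrip().startswith("-"):
--             independent.append(line.lstrip("-").strip())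
--     return thread, independent
-- ===== SOURCE B (Python) =====
-- def parse_tweets_md(md: str):
--     lines = md.splitlines()
--     # Phase 1 — backward scan: cut the document into (mode, chunk) segments.
--     # Scanning back to front lets each header line close the chunk of lines
--     # that follow it, so no running "current mode" state is ever needed.
--     rev_segments = []          # completed segments, collected last-to-first
--     rev_chunk = []             # current chunk's lines, collected last-to-first
--     for line in reversed(lines):
--         if line.startswith("Post thread:"):
--             rev_segments.append(("thread", rev_chunk[::-1]))
--             rev_chunk = []
--         elif line.startswith("As independent posts:"):
--             rev_segments.append(("independent", rev_chunk[::-1]))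
--             rev_chunk = []
--         else:
--             rev_chunk.append(line)
--     # whatever is left in rev_chunk precedes every header and is dropped
--     # Phase 2 — extract from each segment according to its mode.
--     thread, independent = [], []
--     for mode, chunk in reversed(rev_segments):
--         if mode == "thread":
--             thread += [l.split(".", 1)[1].strip() for l in chunk
--                        if l.strip() and l.lstrip()[0].isdigit() and "." in l]
--         else:
--             independent += [l.lstrip("-").strip() for l in chunk
--                             if l.lstrip().startswith("-")]
--     return thread, independent
-- ===== Notes on version B (the rewrite author's own statement) =====
-- stated objective: alternative
-- what changed: A's forward scan with a mutable mode variable that classifies and extracts each line in one fused loop is replaced by a backward scan that needs no mode state (each header closes the chunk of lines after it) producing (mode, chunk) segments, followed by a per-segment extraction pass.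
import Mathlib
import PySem

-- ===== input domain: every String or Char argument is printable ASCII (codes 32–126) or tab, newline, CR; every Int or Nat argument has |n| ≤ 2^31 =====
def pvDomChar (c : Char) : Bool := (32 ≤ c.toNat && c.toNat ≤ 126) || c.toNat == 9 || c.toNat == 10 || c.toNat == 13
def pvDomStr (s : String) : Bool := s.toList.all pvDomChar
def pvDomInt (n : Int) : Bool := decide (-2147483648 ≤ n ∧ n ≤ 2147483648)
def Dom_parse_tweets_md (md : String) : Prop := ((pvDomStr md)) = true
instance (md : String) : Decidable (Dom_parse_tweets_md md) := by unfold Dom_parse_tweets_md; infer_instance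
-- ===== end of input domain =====

-- B replaces A's forward scan with a mutable mode variable (classify + extract fused
-- in one loop body) by a backward scan with no mode state — each header closes the
-- chunk of lines after it, yielding (mode, chunk) segments — followed by a
-- per-segment extraction pass; objective: alternative decomposition, same cost.

-- shared line-level helpers (both Pythons compute these same sub-expressions)
def pvThreadHdr : List Char := "Post thread:".toList
def pvIndepHdr : List Char := "As independent posts:".toList

-- line.lstrip()[0].isdigit()  — none is unreachable under the blank-line guard
def pvDigitHead (line : List Char) : Bool :=
  match PySem.List.pyGet? (PySem.Chars.lstrip line) 0 with
  | some c => PySem.Chars.isdigit c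
  | none => false

-- line.split(".", 1)[1].strip() — the [1] is guarded by '"." in line', so none is unreachable
def pvSplitDot (line : List Char) : List Char :=
  match PySem.List.pyGet? (PySem.Chars.splitOnMax line ['.'] 1) 1 with
  | some rest => PySem.Chars.strip rest
  | none => []

-- line.lstrip("-") : drop leading '-' characters (exact for a single-char strip set)
def pvLstripDash (line : List Char) : List Char := List.dropWhile (fun c => c == '-') line

-- ===== PORT A =====
-- mode: none = None, some true = "thread", some false = "independent"
def pvStepA (st : Option Bool × List String × List String) (line : List Char) :
    Option Bool × List String × List String :=
  if PySem.Chars.startswith line pvThreadHdr then (some true, st.2.1, st.2.2)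
  else if PySem.Chars.startswith line pvIndepHdr then (some false, st.2.1, st.2.2)
  else if (PySem.Chars.strip line).isEmpty || st.1 == none then st
  else if st.1 == some true && (pvDigitHead line && PySem.Chars.isIn ['.'] line) then
    (st.1, st.2.1 ++ [String.ofList (pvSplitDot line)], st.2.2)
  else if st.1 == some false && PySem.Chars.startswith (PySem.Chars.lstrip line) ['-'] then
    (st.1, st.2.1, st.2.2 ++ [String.ofList (PySem.Chars.strip (pvLstripDash line))])
  else st

def parse_tweets_md (md : String) : List String × List String :=
  ((PySem.Chars.splitlines md.toList).foldl pvStepA (none, [], [])).2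

-- ===== PORT B =====
-- phase 1 step, run over reversed(lines): state = (rev_segments, rev_chunk);
-- chunk[::-1] is ported as List.reverse (exact: the whole-list step -1 slice)
def pvStepBrev (st : List (Bool × List (List Char)) × List (List Char)) (line : List Char) :
    List (Bool × List (List Char)) × List (List Char) :=
  if PySem.Chars.startswith line pvThreadHdr then (st.1 ++ [(true, st.2.reverse)], [])
  else if PySem.Chars.startswith line pvIndepHdr then (st.1 ++ [(false, st.2.reverse)], [])
  else (st.1, st.2 ++ [line])

-- the two comprehensions of phase 2, as filter+map on one line
def pvExT (l : List Char) : Option String :=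
  if !(PySem.Chars.strip l).isEmpty && (pvDigitHead l && PySem.Chars.isIn ['.'] l) then
    some (String.ofList (pvSplitDot l))
  else none

def pvExI (l : List Char) : Option String :=
  if PySem.Chars.startswith (PySem.Chars.lstrip l) ['-'] then
    some (String.ofList (PySem.Chars.strip (pvLstripDash l)))
  else none

-- phase 2 step: extend thread or independent with the segment's extraction
def pvStepExtract (acc : List String × List String) (seg : Bool × List (List Char)) :
    List String × List String :=
  if seg.1 then (acc.1 ++ seg.2.filterMap pvExT, acc.2)
  else (acc.1, acc.2 ++ seg.2.filterMap pvExI)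

def parse_tweets_md_alt (md : String) : List String × List String :=
  (((PySem.Chars.splitlines md.toList).reverse.foldl pvStepBrev ([], [])).1.reverse).foldl
    pvStepExtract ([], [])

-- ===== PRECONDITION & SPEC =====
def Spec_parse_tweets_md (md : String) (out : List String × List String) : Prop := out = parse_tweets_md_alt md
instance (md : String) (out : List String × List String) : Decidable (Spec_parse_tweets_md md out) := by unfold Spec_parse_tweets_md; infer_instance

-- ===== CLAIM (what is proved, stated in full; the proofs are below) =====
def Claim_equal_parse_tweets_md : Prop := ∀ (md : String), Dom_parse_tweets_md md → Spec_parse_tweets_md md (parse_tweets_md md)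

-- ===== LEMMAS AND PROOFS =====

-- proof-only helpers: cons-style characterisations of both programs

-- A's loop, without accumulators
def pvSpecA : Option Bool → List (List Char) → List String × List String
  | _, [] => ([], [])
  | m, l :: ls =>
    if PySem.Chars.startswith l pvThreadHdr then pvSpecA (some true) ls
    else if PySem.Chars.startswith l pvIndepHdr then pvSpecA (some false) ls
    else if (PySem.Chars.strip l).isEmpty || m == none then pvSpecA m ls
    else if m == some true && (pvDigitHead l && PySem.Chars.isIn ['.'] l) then
      (String.ofList (pvSplitDot l) :: (pvSpecA m ls).1, (pvSpecA m ls).2)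
    else if m == some false && PySem.Chars.startswith (PySem.Chars.lstrip l) ['-'] then
      ((pvSpecA m ls).1, String.ofList (PySem.Chars.strip (pvLstripDash l)) :: (pvSpecA m ls).2)
    else pvSpecA m ls

-- B's phase 1, cons-style: (segments in order, leading chunk before the first header)
def pvSegR : List (List Char) → List (Bool × List (List Char)) × List (List Char)
  | [] => ([], [])
  | l :: ls =>
    let r := pvSegR ls
    if PySem.Chars.startswith l pvThreadHdr then ((true, r.2) :: r.1, [])
    else if PySem.Chars.startswith l pvIndepHdr then ((false, r.2) :: r.1, [])
    else (r.1, l :: r.2)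

-- B's phase 2, cons-style
def pvExtractAll : List (Bool × List (List Char)) → List String × List String
  | [] => ([], [])
  | (m, c) :: rest =>
    let r := pvExtractAll rest
    if m then (c.filterMap pvExT ++ r.1, r.2) else (r.1, c.filterMap pvExI ++ r.2)

-- what A computes from mode m, in terms of B's segmentation
def pvGlue (m : Option Bool) (s : List (Bool × List (List Char)) × List (List Char)) :
    List String × List String :=
  match m with
  | none => pvExtractAll s.1
  | some true => (s.2.filterMap pvExT ++ (pvExtractAll s.1).1, (pvExtractAll s.1).2)
  | some false => ((pvExtractAll s.1).1, s.2.filterMap pvExI ++ (pvExtractAll s.1).2)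

-- a blank line has an empty lstrip, so lstrip(line).startswith('-') is false there
lemma pv_lstrip_nil_of_strip_nil (l : List Char) (h : (PySem.Chars.strip l).isEmpty = true) :
    PySem.Chars.lstrip l = [] := by
  simp only [PySem.Chars.strip, PySem.Chars.rstrip, List.isEmpty_iff, List.reverse_eq_nil_iff,
    List.dropWhile_eq_nil_iff, List.mem_reverse] at h
  cases hl : PySem.Chars.lstrip l with
  | nil => rfl
  | cons c cs =>
    have hc : PySem.Chars.isspace c = false := by
      have := List.head_dropWhile_not (p := PySem.Chars.isspace) (l := l)
      simp only [PySem.Chars.lstrip] at hl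
      rw [hl] at this
      simpa using this (by simp)
    have := h c (by rw [hl]; simp)
    simp [hc] at this

lemma pv_foldA (lines : List (List Char)) (m : Option Bool) (tb ib : List String) :
    (lines.foldl pvStepA (m, tb, ib)).2
      = (tb ++ (pvSpecA m lines).1, ib ++ (pvSpecA m lines).2) := by
  induction lines generalizing m tb ib with
  | nil => simp [pvSpecA]
  | cons l ls ih =>
    simp only [List.foldl, pvStepA, pvSpecA]
    split_ifs <;> simp [ih]

lemma pv_foldBrev (lines : List (List Char)) :
    lines.reverse.foldl pvStepBrev ([], [])
      = ((pvSegR lines).1.reverse, (pvSegR lines).2.reverse) := by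
  induction lines with
  | nil => simp [pvSegR]
  | cons l ls ih =>
    rw [List.reverse_cons, List.foldl_concat, ih]
    simp only [pvStepBrev, pvSegR]
    split_ifs <;> simp

lemma pv_foldExtract (segs : List (Bool × List (List Char))) (t i : List String) :
    segs.foldl pvStepExtract (t, i)
      = (t ++ (pvExtractAll segs).1, i ++ (pvExtractAll segs).2) := by
  induction segs generalizing t i with
  | nil => simp [pvExtractAll]
  | cons s rest ih =>
    obtain ⟨m, c⟩ := s
    simp only [List.foldl, pvStepExtract, pvExtractAll]
    split_ifs with h <;> simp [ih]

lemma pv_glue (lines : List (List Char)) (m : Option Bool) :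
    pvSpecA m lines = pvGlue m (pvSegR lines) := by
  induction lines generalizing m with
  | nil => cases m with
    | none => simp [pvSpecA, pvSegR, pvGlue, pvExtractAll]
    | some b => cases b <;> simp [pvSpecA, pvSegR, pvGlue, pvExtractAll]
  | cons l ls ih =>
    simp only [pvSpecA, pvSegR]
    by_cases h1 : PySem.Chars.startswith l pvThreadHdr
    · simp only [h1, if_true, ih]
      cases m <;> (try (rename_i b; cases b)) <;> simp [pvGlue, pvExtractAll]
    · by_cases h2 : PySem.Chars.startswith l pvIndepHdr
      · simp only [h1, h2, if_true, ih]
        cases m <;> (try (rename_i b; cases b)) <;> simp [pvGlue, pvExtractAll]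
      · match m with
        | none =>
          simp [h1, h2, ih, pvGlue]
        | some true =>
          by_cases h3 : (PySem.Chars.strip l).isEmpty
          · have he : pvExT l = none := by simp [pvExT, h3]
            simp [h1, h2, h3, ih, pvGlue, he]
          · by_cases h4 : (pvDigitHead l && PySem.Chars.isIn ['.'] l) = true
            · have he : pvExT l = some (String.ofList (pvSplitDot l)) := by
                simp [pvExT, h3, h4]
              simp [h1, h2, h3, h4, ih, pvGlue, he]
            · have he : pvExT l = none := by
                simp only [pvExT]
                rw [if_neg]
                simp [h4]
              simp [h1, h2, h3, h4, ih, pvGlue, he]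
        | some false =>
          by_cases h4 : PySem.Chars.startswith (PySem.Chars.lstrip l) ['-'] = true
          · have he : pvExI l = some (String.ofList (PySem.Chars.strip (pvLstripDash l))) := by
              simp [pvExI, h4]
            by_cases h3 : (PySem.Chars.strip l).isEmpty
            · exfalso
              rw [pv_lstrip_nil_of_strip_nil l h3] at h4
              simp [PySem.Chars.startswith] at h4
            · simp [h1, h2, h3, h4, ih, pvGlue, he]
          · have he : pvExI l = none := by simp [pvExI, h4]
            by_cases h3 : (PySem.Chars.strip l).isEmpty
            · simp [h1, h2, h3, ih, pvGlue, he]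
            · simp [h1, h2, h3, h4, ih, pvGlue, he]

-- ===== VERDICT (by name: the statement is the Claim_ definition above) =====
theorem parse_tweets_md_spec : Claim_equal_parse_tweets_md := by
  intro md _
  unfold Spec_parse_tweets_md parse_tweets_md parse_tweets_md_alt
  rw [pv_foldBrev]
  simp only [List.reverse_reverse]
  rw [pv_foldExtract]
  simp [pv_foldA, pv_glue, pvGlue]
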